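-- pv_equiv track=rewrite | github.com/alwaysday4u/Coding_test | Programmers/Level 2/3 x n 타일링.py | solution
-- ===== SOURCE A (Python) =====
-- def solution(n):
--     dp = [0]*(n+1)
--     if n%2:
--         return 0
--     else:
--         for i in range(n+1):
--             if i==2:
--                 dp[i]=3
--             elif i==4:
--                 dp[i]=11
--             else:
--                 dp[i] = 4*dp[i-2]-dp[i-4]%1000000007
--
--         return dp[n]%1000000007
-- ===== SOURCE B (Python) =====
-- MOD = 1000000007
--
--
-- def solution(n):
--     # 3 x n tiling count mod 1e9+7.  Odd widths admit no tiling.  For even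
--     # n = 2k the counts g(k) satisfy g(k) = 4*g(k-1) - g(k-2), g(0) = 1,
--     # g(1) = 3; compute g(k) by 2x2 matrix exponentiation mod MOD.
--     if n % 2:
--         return 0
--     e = n // 2
--     # result matrix (a,b,c,d) starts as the identity; (x,y,z,w) holds
--     # successive squarings of M = [[4, -1], [1, 0]] (mod MOD).
--     a, b, c, d = 1, 0, 0, 1
--     x, y, z, w = 4, MOD - 1, 1, 0
--     while e > 0:
--         if e & 1:
--             a, b, c, d = (a * x + b * z) % MOD, (a * y + b * w) % MOD, \
--                          (c * x + d * z) % MOD, (c * y + d * w) % MOD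
--         x, y, z, w = (x * x + y * z) % MOD, (x * y + y * w) % MOD, \
--                      (z * x + w * z) % MOD, (z * y + w * w) % MOD
--         e >>= 1
--     # M^k = [[a,b],[c,d]] and (g(k+1), g(k)) = M^k (3, 1)
--     return (c * 3 + d) % MOD
-- ===== Notes on version B (the rewrite author's own statement) =====
-- stated objective: faster
-- what changed: Replaces the O(n) list-filling DP (whose big integers grow to n bits because the mod is applied, due to a precedence slip, only to dp[i-4]) by 2x2 matrix exponentiation of the recurrence g(k)=4g(k-1)-g(k-2) fully reduced mod 1e9+7, O(log n) multiplications on bounded integers.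
-- outside the precondition, e.g. on solution(0): A raises IndexError, B returns 1; on solution(2): A raises IndexError, B returns 3; on solution(-2): A raises IndexError, B returns 1
-- crash fix: On even n < 4 (n = 0, 2 and every negative even n) A raises IndexError while indexing dp; B returns the tiling count there (1 for n <= 0, 3 for n = 2). — e.g. on solution(2): A raises IndexError, B returns 3
import Mathlib
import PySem

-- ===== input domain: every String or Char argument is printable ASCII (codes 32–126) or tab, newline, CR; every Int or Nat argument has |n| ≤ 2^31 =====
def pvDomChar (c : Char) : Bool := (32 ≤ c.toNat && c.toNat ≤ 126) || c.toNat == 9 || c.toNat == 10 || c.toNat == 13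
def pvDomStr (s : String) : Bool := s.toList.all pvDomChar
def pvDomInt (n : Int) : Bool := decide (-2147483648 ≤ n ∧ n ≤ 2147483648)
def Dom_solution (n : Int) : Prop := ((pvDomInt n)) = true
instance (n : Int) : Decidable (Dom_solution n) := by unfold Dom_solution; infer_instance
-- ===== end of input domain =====

-- B replaces A's O(n) list DP (whose integers grow unboundedly because A's mod
-- lands, by precedence, only on dp[i-4]) by 2x2 matrix exponentiation of
-- g(k) = 4*g(k-1) - g(k-2) reduced mod 1e9+7 at every step: faster (measured).

-- ===== PORT A =====
def aStep (dp : List Int) (i : Int) : List Int :=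
  if i == 2 then PySem.List.pySetD dp i 3
  else if i == 4 then PySem.List.pySetD dp i 11
  else PySem.List.pySetD dp i
    (4 * PySem.List.pyGetD dp (i - 2) 0
      - PySem.Int.mod (PySem.List.pyGetD dp (i - 4) 0) 1000000007)

def solution (n : Int) : Int :=
  let dp0 := List.replicate (n + 1).toNat (0 : Int)
  if PySem.Int.mod n 2 ≠ 0 then 0
  else
    let dp := (PySem.List.pyRange 0 (n + 1) 1).foldl aStep dp0
    PySem.Int.mod (PySem.List.pyGetD dp n 0) 1000000007

-- ===== PORT B =====
def MODB : Int := 1000000007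

def bMulMod (p q : Int × Int × Int × Int) : Int × Int × Int × Int :=
  match p, q with
  | (a, b, c, d), (x, y, z, w) =>
    (PySem.Int.mod (a * x + b * z) MODB, PySem.Int.mod (a * y + b * w) MODB,
     PySem.Int.mod (c * x + d * z) MODB, PySem.Int.mod (c * y + d * w) MODB)

def bLoop (e : Nat) (acc sq : Int × Int × Int × Int) : Int × Int × Int × Int :=
  if h : e = 0 then acc
  else bLoop (e / 2) (if e % 2 = 1 then bMulMod acc sq else acc) (bMulMod sq sq)
  termination_by e
  decreasing_by exact Nat.div_lt_self (Nat.pos_of_ne_zero h) one_lt_two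

def solution_alt (n : Int) : Int :=
  if PySem.Int.mod n 2 ≠ 0 then 0
  else
    let e := PySem.Int.floordiv n 2
    match bLoop e.toNat (1, 0, 0, 1) (4, MODB - 1, 1, 0) with
    | (_, _, c, d) => PySem.Int.mod (c * 3 + d) MODB

-- ===== PRECONDITION & SPEC =====
-- Pre_ excludes exactly the even n < 4 (n = 0, 2 and the negative evens), on
-- which A's dp indexing raises IndexError.
def Pre_solution (n : Int) : Prop := PySem.Int.mod n 2 = 1 ∨ 4 ≤ n
instance (n : Int) : Decidable (Pre_solution n) := by unfold Pre_solution; infer_instance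

def pvWitness_solution : Int := 6

-- On even n < 4 (n = 0, 2 and every negative even n) A raises IndexError while
-- indexing dp; B returns the tiling count there (1 for n ≤ 0, 3 for n = 2).
def Raises_solution (n : Int) : Prop := PySem.Int.mod n 2 = 0 ∧ n < 4
instance (n : Int) : Decidable (Raises_solution n) := by unfold Raises_solution; infer_instance
def pvRaiseWitness_solution : Int := 2
def pvRaiseWitnessOut_solution : Int := 3

def Spec_solution (n : Int) (out : Int) : Prop := out = solution_alt n
instance (n : Int) (out : Int) : Decidable (Spec_solution n out) := by unfold Spec_solution; infer_instance

-- ===== CLAIM (what is proved, stated in full; the proofs are below) =====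
def Claim_equal_solution : Prop := ∀ (n : Int), Dom_solution n → Pre_solution n → Spec_solution n (solution n)
def Claim_raises_solution : Prop := (∀ (n : Int), Dom_solution n → Raises_solution n → ¬ Pre_solution n) ∧ (Dom_solution (pvRaiseWitness_solution) ∧ Raises_solution (pvRaiseWitness_solution) ∧ solution_alt (pvRaiseWitness_solution) = pvRaiseWitnessOut_solution)

-- ===== LEMMAS AND PROOFS =====

-- the values A's loop writes into dp (the negative-index reads at i = 0, 1, 3
-- hit still-zero cells at the end of dp, so those entries are 0)
def F : Nat → Int
  | 0 => 0
  | 1 => 0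
  | 2 => 3
  | 3 => 0
  | 4 => 11
  | (i + 5) => 4 * F (i + 3) - PySem.Int.mod (F (i + 1)) 1000000007

-- the tiling recurrence in ZMod
def gz : Nat → ZMod 1000000007
  | 0 => 1
  | 1 => 3
  | (k + 2) => 4 * gz (k + 1) - gz k

-- A's dp after its first j loop iterations (length N+1)
def dpS (N j : Nat) : List Int :=
  (List.range (N + 1)).map (fun i => if i < j then F i else 0)

theorem length_dpS (N j : Nat) : (dpS N j).length = N + 1 := by simp [dpS]

theorem getD_dpS (N j i : Nat) (h : i ≤ N) :
    (dpS N j).getD i 0 = if i < j then F i else 0 := by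
  rw [List.getD_eq_getElem _ _ (by simp [length_dpS]; omega)]
  simp [dpS, List.getElem_map, List.getElem_range]

theorem getElem_dpS (N j i : Nat) (h : i < (dpS N j).length) :
    (dpS N j)[i] = if i < j then F i else 0 := by
  simp [dpS]

theorem set_dpS (N j : Nat) (hj : j ≤ N) :
    (dpS N j).set j (F j) = dpS N (j + 1) := by
  apply List.ext_getElem (by simp [length_dpS])
  intro i h1 h2
  rw [List.getElem_set]
  simp only [dpS, List.getElem_map, List.getElem_range]
  split_ifs with h3 h4 h5 <;> first | (subst h3; rfl) | rfl | omega

theorem mod_zero' : PySem.Int.mod 0 1000000007 = 0 := by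
  rw [PySem.Int.mod_eq_emod_of_pos (by norm_num)]; simp

theorem aStep_dpS (N j : Nat) (hN : 4 ≤ N) (hj : j ≤ N) :
    aStep (dpS N j) ((j : Nat) : Int) = dpS N (j + 1) := by
  have hlen : (dpS N j).length = N + 1 := length_dpS N j
  rcases j with _|_|_|_|_|m
  · -- j = 0
    norm_num [aStep]
    rw [PySem.List.pyGetD_neg_ofNat _ 2 0 (by omega) (by simp [length_dpS]; omega),
        PySem.List.pyGetD_neg_ofNat _ 4 0 (by omega) (by simp [length_dpS]; omega)]
    rw [getElem_dpS, getElem_dpS, hlen]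
    rw [if_neg (by omega), if_neg (by omega)]
    norm_num [mod_zero']
    rw [show PySem.List.pySetD (dpS N 0) 0 (0:Int) = (dpS N 0).set 0 (0:Int) from
      PySem.List.pySetD_natCast (dpS N 0) 0 0]
    exact set_dpS N 0 (by omega)
  · -- j = 1
    norm_num [aStep]
    rw [PySem.List.pyGetD_neg_ofNat _ 1 0 (by omega) (by simp [length_dpS]),
        PySem.List.pyGetD_neg_ofNat _ 3 0 (by omega) (by simp [length_dpS]; omega)]
    rw [getElem_dpS, getElem_dpS, hlen]
    rw [if_neg (by omega), if_neg (by omega)]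
    norm_num [mod_zero']
    rw [show PySem.List.pySetD (dpS N 1) 1 0 = (dpS N 1).set 1 (0:Int) from
      PySem.List.pySetD_natCast (dpS N 1) 1 0]
    exact set_dpS N 1 (by omega)
  · -- j = 2
    norm_num [aStep]
    rw [show PySem.List.pySetD (dpS N 2) 2 3 = (dpS N 2).set 2 (3:Int) from
      PySem.List.pySetD_natCast (dpS N 2) 2 3]
    exact set_dpS N 2 (by omega)
  · -- j = 3
    norm_num [aStep]
    rw [PySem.List.pyGetD_neg_ofNat _ 1 0 (by omega) (by simp [length_dpS])]
    rw [show (1:Int) = ((1:Nat):Int) from rfl, PySem.List.pyGetD_natCast]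
    rw [getD_dpS N 3 1 (by omega), getElem_dpS, hlen]
    rw [if_pos (by omega), if_neg (by omega)]
    norm_num [mod_zero', show F 1 = 0 from rfl]
    rw [show PySem.List.pySetD (dpS N 3) 3 0 = (dpS N 3).set 3 (0:Int) from
      PySem.List.pySetD_natCast (dpS N 3) 3 0]
    exact set_dpS N 3 (by omega)
  · -- j = 4
    norm_num [aStep]
    rw [show PySem.List.pySetD (dpS N 4) 4 11 = (dpS N 4).set 4 (11:Int) from
      PySem.List.pySetD_natCast (dpS N 4) 4 11]
    exact set_dpS N 4 (by omega)
  · -- j = m + 5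
    have h2 : ¬ (((m+5:Nat):Int) == 2) = true := by simp; omega
    have h4 : ¬ (((m+5:Nat):Int) == 4) = true := by simp; omega
    rw [aStep, if_neg h2, if_neg h4]
    rw [show ((m+5:Nat):Int) - 2 = ((m+3:Nat):Int) by push_cast; ring,
        show ((m+5:Nat):Int) - 4 = ((m+1:Nat):Int) by push_cast; ring,
        PySem.List.pyGetD_natCast, PySem.List.pyGetD_natCast,
        getD_dpS N _ (m+3) (by omega), getD_dpS N _ (m+1) (by omega),
        if_pos (by omega), if_pos (by omega),
        PySem.List.pySetD_natCast]
    exact set_dpS N (m+5) (by omega)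

theorem dpS_zero (N : Nat) : dpS N 0 = List.replicate (N + 1) (0 : Int) := by
  apply List.ext_getElem (by simp [length_dpS])
  intro i h1 h2
  simp [dpS]

theorem foldl_range_dpS (N : Nat) (hN : 4 ≤ N) (j : Nat) (hj : j ≤ N + 1) :
    (List.range j).foldl (fun dp (k : Nat) => aStep dp (k : Int)) (dpS N 0) = dpS N j := by
  induction j with
  | zero => rfl
  | succ j ih =>
    rw [List.range_succ, List.foldl_append, ih (by omega)]
    simp only [List.foldl_cons, List.foldl_nil]
    exact aStep_dpS N j hN (by omega)

theorem solution_even (n : Int) (h2 : PySem.Int.mod n 2 = 0) (h4 : 4 ≤ n) :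
    solution n = PySem.Int.mod (F n.toNat) 1000000007 := by
  obtain ⟨N, rfl⟩ : ∃ N : Nat, n = (N : Int) := ⟨n.toNat, by omega⟩
  have hN4 : 4 ≤ N := by exact_mod_cast h4
  unfold solution
  rw [if_neg (not_not_intro h2)]
  rw [PySem.List.pyRange_one 0 ((N : Int) + 1), List.foldl_map]
  rw [show (((N : Int) + 1) - 0).toNat = N + 1 by omega,
      show ((N : Int) + 1).toNat = N + 1 by omega, ← dpS_zero]
  have hb : (fun (dp : List Int) (k : Nat) => aStep dp ((0 : Int) + (k : Int)))
      = fun (dp : List Int) (k : Nat) => aStep dp (k : Int) := by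
    funext dp k; rw [zero_add]
  rw [hb, foldl_range_dpS N hN4 (N + 1) le_rfl]
  show PySem.Int.mod (PySem.List.pyGetD (dpS N (N + 1)) (N : Int) 0) 1000000007 = _
  rw [PySem.List.pyGetD_natCast, getD_dpS N (N + 1) N le_rfl, if_pos (by omega)]
  simp

theorem castmod (a : Int) :
    ((PySem.Int.mod a 1000000007 : Int) : ZMod 1000000007) = (a : ZMod 1000000007) := by
  rw [PySem.Int.mod_eq_emod_of_pos (by norm_num)]
  exact_mod_cast ZMod.intCast_mod a 1000000007

theorem mod_eq_of_cast (a b : Int) (h : (a : ZMod 1000000007) = (b : ZMod 1000000007)) :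
    PySem.Int.mod a 1000000007 = PySem.Int.mod b 1000000007 := by
  rw [PySem.Int.mod_eq_emod_of_pos (by norm_num), PySem.Int.mod_eq_emod_of_pos (by norm_num)]
  exact (ZMod.intCast_eq_intCast_iff a b 1000000007).mp h

theorem Fz (k : Nat) : ((F (2 * k + 2) : Int) : ZMod 1000000007) = gz (k + 1) := by
  induction k using Nat.strong_induction_on with
  | _ k ih =>
    match k with
    | 0 => norm_num [F, gz]
    | 1 =>
      rw [show 2 * 1 + 2 = 4 by norm_num, show F 4 = 11 from rfl,
          show gz (1 + 1) = 4 * gz 1 - gz 0 from rfl, show gz 1 = 3 from rfl,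
          show gz 0 = 1 from rfl]
      norm_num
    | (m + 2) =>
      rw [show 2 * (m + 2) + 2 = (2 * m + 1) + 5 by ring,
          show F ((2 * m + 1) + 5)
            = 4 * F (2 * m + 1 + 3) - PySem.Int.mod (F (2 * m + 1 + 1)) 1000000007 from rfl]
      push_cast [castmod]
      rw [show 2 * m + 1 + 3 = 2 * (m + 1) + 2 by ring, show 2 * m + 1 + 1 = 2 * m + 2 by ring,
          ih (m + 1) (by omega), ih m (by omega),
          show gz (m + 2 + 1) = 4 * gz (m + 2) - gz (m + 1) from rfl]

def Zm (p : Int × Int × Int × Int) : Matrix (Fin 2) (Fin 2) (ZMod 1000000007) :=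
  !![(p.1 : ZMod 1000000007), (p.2.1 : ZMod 1000000007);
     (p.2.2.1 : ZMod 1000000007), (p.2.2.2 : ZMod 1000000007)]

theorem Zm_mul (p q : Int × Int × Int × Int) : Zm (bMulMod p q) = Zm p * Zm q := by
  obtain ⟨a, b, c, d⟩ := p
  obtain ⟨x, y, z, w⟩ := q
  show Zm (_, _, _, _) = _
  simp only [Zm, MODB, castmod, Matrix.mul_fin_two]
  push_cast
  ring_nf

theorem bLoop_Z (e : Nat) (acc sq : Int × Int × Int × Int) :
    Zm (bLoop e acc sq) = Zm acc * (Zm sq) ^ e := by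
  induction e using Nat.strong_induction_on generalizing acc sq with
  | _ e ih =>
    by_cases h : e = 0
    · subst h; rw [bLoop]; simp
    · rw [bLoop]
      simp only [h, dite_false]
      rw [ih (e / 2) (Nat.div_lt_self (Nat.pos_of_ne_zero h) one_lt_two), Zm_mul,
        ← pow_two (Zm sq), ← pow_mul]
      by_cases hp : e % 2 = 1
      · rw [if_pos hp, Zm_mul, mul_assoc, ← pow_succ']
        rw [show 2 * (e / 2) + 1 = e by omega]
      · rw [if_neg hp]
        rw [show 2 * (e / 2) = e by omega]

def Mz : Matrix (Fin 2) (Fin 2) (ZMod 1000000007) := !![4, -1; 1, 0]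
def vg (k : Nat) : Fin 2 → ZMod 1000000007 := ![gz (k + 1), gz k]

theorem Mz_mulVec (k : Nat) : Mz.mulVec (vg k) = vg (k + 1) := by
  have hg : gz (k + 2) = 4 * gz (k + 1) - gz k := rfl
  funext i
  fin_cases i <;>
    simp [Mz, vg, Matrix.mulVec, dotProduct, Fin.sum_univ_two, hg] <;> ring

theorem Mz_pow_mulVec (k : Nat) : (Mz ^ k).mulVec (vg 0) = vg k := by
  induction k with
  | zero => simp
  | succ k ih => rw [pow_succ', ← Matrix.mulVec_mulVec, ih, Mz_mulVec]

theorem Mz_pow_entry (k : Nat) : (Mz ^ k) 1 0 * 3 + (Mz ^ k) 1 1 = gz k := by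
  have h := congrFun (Mz_pow_mulVec k) 1
  simpa [Matrix.mulVec, dotProduct, Fin.sum_univ_two, vg, gz, mul_comm] using h

theorem Zm_one : Zm (1, 0, 0, 1) = 1 := by
  simp [Zm, Matrix.one_fin_two]

theorem Zm_M : Zm (4, MODB - 1, 1, 0) = Mz := by
  simp only [Zm, Mz, MODB]
  norm_num
  decide

theorem solution_alt_even (n : Int) (h2 : PySem.Int.mod n 2 = 0) :
    solution_alt n
      = PySem.Int.mod
          ((bLoop (PySem.Int.floordiv n 2).toNat (1, 0, 0, 1) (4, MODB - 1, 1, 0)).2.2.1 * 3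
            + (bLoop (PySem.Int.floordiv n 2).toNat (1, 0, 0, 1) (4, MODB - 1, 1, 0)).2.2.2)
          1000000007 := by
  unfold solution_alt
  rw [if_neg (not_not_intro h2)]
  show (match bLoop (PySem.Int.floordiv n 2).toNat (1, 0, 0, 1) (4, MODB - 1, 1, 0) with
    | (_, _, c, d) => PySem.Int.mod (c * 3 + d) MODB) = _
  rcases hb : bLoop (PySem.Int.floordiv n 2).toNat (1, 0, 0, 1) (4, MODB - 1, 1, 0)
    with ⟨a, b, c, d⟩
  rfl

-- ===== VERDICT (by name: the statement is the Claim_ definition above) =====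
theorem solution_spec : Claim_equal_solution := by
  unfold Claim_equal_solution
  intro n _ hpre
  unfold Spec_solution
  by_cases h2 : PySem.Int.mod n 2 = 0
  · have h4 : 4 ≤ n := by
      rcases hpre with h1 | h1
      · rw [h2] at h1; exact absurd h1 (by norm_num)
      · exact h1
    rw [solution_even n h2 h4, solution_alt_even n h2]
    have hq := PySem.Int.floordiv_mul_add_mod n 2
    rw [h2] at hq
    set q := PySem.Int.floordiv n 2 with hqdef
    have hq2 : n = 2 * q := by omega
    have hk2 : 2 ≤ q := by omega
    have hkN : n.toNat = 2 * q.toNat := by omega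
    have hkt : q.toNat = (q.toNat - 1) + 1 := by omega
    apply mod_eq_of_cast
    -- A side value
    rw [hkN, show 2 * q.toNat = 2 * (q.toNat - 1) + 2 by omega, Fz (q.toNat - 1), ← hkt]
    -- B side value
    have hz := bLoop_Z q.toNat (1, 0, 0, 1) (4, MODB - 1, 1, 0)
    rw [Zm_one, Zm_M, one_mul] at hz
    have hc : (((bLoop q.toNat (1, 0, 0, 1) (4, MODB - 1, 1, 0)).2.2.1 : Int) : ZMod 1000000007)
        = (Mz ^ q.toNat) 1 0 := by rw [← hz]; rfl
    have hd : (((bLoop q.toNat (1, 0, 0, 1) (4, MODB - 1, 1, 0)).2.2.2 : Int) : ZMod 1000000007)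
        = (Mz ^ q.toNat) 1 1 := by rw [← hz]; rfl
    push_cast
    rw [hc, hd]
    exact (Mz_pow_entry q.toNat).symm
  · -- odd n: both return 0
    unfold solution solution_alt
    rw [if_pos h2, if_pos h2]

@[simp] theorem solution_raises : Claim_raises_solution := by
  unfold Claim_raises_solution
  constructor
  · intro n _ hr hp
    rcases hr with ⟨h0, h4⟩
    rcases hp with h1 | h1
    · rw [h0] at h1; exact absurd h1 (by norm_num)
    · omega
  · refine ⟨by decide, by decide, ?_⟩
    show solution_alt 2 = 3
    norm_num [solution_alt, PySem.Int.mod, PySem.Int.floordiv]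
    rw [bLoop]; norm_num [bMulMod, MODB, PySem.Int.mod]
    rw [bLoop]; norm_num
    decide
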